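-- pv_equiv track=rewrite | github.com/vinodreddem/PythonPractice | Core_Python/subset_sumgreterthanremain.py | subsetA
-- ===== SOURCE A (Python) =====
-- def subsetA(arr):
--     ori_arr = arr.copy()
--     arr.sort(reverse = True)
--     sub_arr_B = []
--     out_arr = []
--     print (arr)
--     for i in range (len(arr)):
--         if sum(sub_arr_B) > sum(arr[i:]):
--             break
--         else:
--             sub_arr_B.append(arr[i])
--
--     for elm in ori_arr:
--         if elm in sub_arr_B:
--             out_arr.append(elm)
--             sub_arr_B.remove(elm)
--
--     return out_arr
-- ===== SOURCE B (Python) =====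
-- def subsetA(arr):
--     # Group-by-value algorithm: count occurrences once, sort only the
--     # distinct values, locate the greedy cut block-wise, then emit the
--     # original order by a threshold comparison with a tie budget (no sorted
--     # element list, no multiset removal).
--     total = sum(arr)
--     groups = {}
--     for x in arr:
--         groups[x] = groups.get(x, 0) + 1
--     prefix = 0
--     cut = None
--     for v in sorted(groups, reverse=True):
--         c = groups[v]
--         m = 0
--         while m < c and 2 * (prefix + m * v) <= total:
--             m += 1
--         prefix += m * v
--         if m < c:
--             cut = (v, m)
--             break
--     if cut is None:
--         return list(arr)
--     t, budget = cut
--     out = []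
--     for x in arr:
--         if x > t:
--             out.append(x)
--         elif x == t and budget > 0:
--             out.append(x)
--             budget -= 1
--     return out
-- ===== Notes on version B (the rewrite author's own statement) =====
-- stated objective: alternative
-- what changed: B never builds or walks a sorted element list: it counts occurrences into a dict, sorts only the distinct values, finds the greedy cut block-wise with a running prefix sum, and emits the original order by a threshold comparison with a tie budget, whereas A sorts the whole list, re-sums a slice at every index and filters by repeated in/remove scans.
import Mathlib
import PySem

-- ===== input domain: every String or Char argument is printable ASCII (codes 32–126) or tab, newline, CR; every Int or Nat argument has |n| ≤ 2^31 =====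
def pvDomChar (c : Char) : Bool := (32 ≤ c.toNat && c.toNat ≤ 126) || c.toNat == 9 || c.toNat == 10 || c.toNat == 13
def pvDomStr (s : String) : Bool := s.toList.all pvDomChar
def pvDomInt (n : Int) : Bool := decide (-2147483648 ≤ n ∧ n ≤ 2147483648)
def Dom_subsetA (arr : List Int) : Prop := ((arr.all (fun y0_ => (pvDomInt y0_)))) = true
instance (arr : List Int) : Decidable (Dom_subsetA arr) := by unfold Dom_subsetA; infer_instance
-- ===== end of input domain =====

-- B groups equal values into counts, sorts only the distinct values, finds the greedy cut
-- block-wise and emits the answer by threshold comparison (objective: alternative). A sorts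
-- its argument in place; the equivalence proved here is about the RETURN value only.

-- ===== PORT A =====
-- A's first loop: index i over the sorted list ↔ the suffix arr[i:]; sums recomputed each step as in A
def subsetA_loop1 : List Int → List Int → List Int
  | [], sub => sub
  | x :: rest, sub =>
      if sub.sum > (x :: rest).sum then sub
      else subsetA_loop1 rest (sub ++ [x])

-- A's second loop: `elm in sub` then `sub.remove(elm)` (first occurrence)
def subsetA_loop2 : List Int → List Int → List Int → List Int
  | [], _, out => out
  | x :: rest, sub, out =>
      if x ∈ sub then subsetA_loop2 rest ((PySem.List.remove? sub x).getD sub) (out ++ [x])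
      else subsetA_loop2 rest sub out

def subsetA (arr : List Int) : List Int :=
  subsetA_loop2 arr (subsetA_loop1 (PySem.List.sorted arr (fun x => x) true) []) []

-- ===== PORT B =====
-- Source B's counting loop: groups[x] = groups.get(x, 0) + 1
def subsetA_altGroups (arr : List Int) : PySem.Dict Int Int :=
  arr.foldl (fun d x => d.insert x (d.getD x 0 + 1)) PySem.Dict.empty

-- Source B's inner while: take copies of v while the doubled running sum stays ≤ total
def subsetA_altWhile (v total pfx c : Int) (m : Int) : Int :=
  if m < c then
    if 2 * (pfx + m * v) ≤ total then subsetA_altWhile v total pfx c (m + 1) else m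
  else m
termination_by (c - m).toNat
decreasing_by omega

-- Source B's block loop over the sorted distinct values, breaking with cut = (v, m)
def subsetA_altBlocks (groups : PySem.Dict Int Int) (total : Int) :
    List Int → Int → Option (Int × Int)
  | [], _ => none
  | v :: vs, pfx =>
      let c := groups.getD v 0
      let m := subsetA_altWhile v total pfx c 0
      if m < c then some (v, m)
      else subsetA_altBlocks groups total vs (pfx + m * v)

-- Source B's final pass: emit x > t always, x == t while the tie budget lasts
def subsetA_altFilter (t : Int) : List Int → Int → List Int → List Int
  | [], _, out => out
  | x :: rest, budget, out =>
      if x > t then subsetA_altFilter t rest budget (out ++ [x])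
      else if x = t ∧ budget > 0 then subsetA_altFilter t rest (budget - 1) (out ++ [x])
      else subsetA_altFilter t rest budget out

def subsetA_alt (arr : List Int) : List Int :=
  let total := arr.sum
  let groups := subsetA_altGroups arr
  match subsetA_altBlocks groups total (PySem.List.sorted groups.keys (fun x => x) true) 0 with
  | none => arr
  | some (t, budget) => subsetA_altFilter t arr budget []

-- ===== PRECONDITION & SPEC =====
def Spec_subsetA (arr : List Int) (out : List Int) : Prop := out = subsetA_alt arr
instance (arr : List Int) (out : List Int) : Decidable (Spec_subsetA arr out) := by unfold Spec_subsetA; infer_instance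

-- ===== CLAIM (what is proved, stated in full; the proofs are below) =====
def Claim_equal_subsetA : Prop := ∀ (arr : List Int), Dom_subsetA arr → Spec_subsetA arr (subsetA arr)

-- ===== LEMMAS AND PROOFS =====

-- element-wise greedy: the proof-side characterisation of A's first loop
def gtake : List Int → Int → Int → List Int
  | [], _, _ => []
  | x :: rest, total, pfx =>
      if 2 * pfx > total then [] else x :: gtake rest total (pfx + x)

-- flatten a list of distinct values into blocks of their multiplicities in arr
def blocksOf (arr : List Int) (vs : List Int) : List Int :=
  vs.flatMap (fun v => List.replicate (arr.count v) v)

-- the sorted distinct values B iterates over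
def ksOf (arr : List Int) : List Int :=
  PySem.List.sorted (subsetA_altGroups arr).keys (fun x => x) true

theorem ksOf_def (arr : List Int) :
    ksOf arr = PySem.List.sorted (subsetA_altGroups arr).keys (fun x => x) true := rfl

theorem loop1_eq_gtake (s sub : List Int) (total : Int) (htot : total = sub.sum + s.sum) :
    subsetA_loop1 s sub = sub ++ gtake s total sub.sum := by
  induction s generalizing sub with
  | nil => simp [subsetA_loop1, gtake]
  | cons x rest ih =>
      simp only [subsetA_loop1, gtake]
      have hc : (sub.sum > (x :: rest).sum) ↔ (2 * sub.sum > total) := by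
        simp only [List.sum_cons] at htot ⊢; omega
      by_cases h : sub.sum > (x :: rest).sum
      · rw [if_pos h, if_pos (hc.mp h)]; simp
      · rw [if_neg h, if_neg (fun hb => h (hc.mpr hb))]
        rw [ih (sub ++ [x]) (by simp only [List.sum_cons, List.sum_append,
              List.sum_cons, List.sum_nil] at htot ⊢; omega)]
        simp

theorem altWhile_le (v total pfx c m : Int) (h : m ≤ c) :
    subsetA_altWhile v total pfx c m ≤ c := by
  fun_induction subsetA_altWhile v total pfx c m with
  | case1 m h1 h2 ih => exact ih (by omega)
  | case2 m h1 h2 => omega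
  | case3 m h1 => omega

theorem altWhile_ge (v total pfx c m : Int) :
    m ≤ subsetA_altWhile v total pfx c m := by
  fun_induction subsetA_altWhile v total pfx c m with
  | case1 m h1 h2 ih => omega
  | case2 m h1 h2 => omega
  | case3 m h1 => omega

-- the inner while walks a replicate-block exactly as the element greedy does
theorem gtake_replicate (v total pfx : Int) (c : Int) (n : Nat) (m : Int)
    (hc : c = m + (n : Int)) (tail : List Int) :
    gtake (List.replicate n v ++ tail) total (pfx + m * v) =
      List.replicate (subsetA_altWhile v total pfx c m - m).toNat v ++
        (if subsetA_altWhile v total pfx c m < c then []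
         else gtake tail total (pfx + c * v)) := by
  induction n generalizing m with
  | zero =>
      have : ¬ m < c := by omega
      rw [subsetA_altWhile, if_neg this]
      simp only [List.replicate_zero, List.nil_append, Int.sub_self, Int.toNat_zero,
        if_neg this]
      have : m = c := by omega
      subst this; simp
  | succ n ih =>
      have hm : m < c := by omega
      rw [subsetA_altWhile, if_pos hm]
      by_cases hcond : 2 * (pfx + m * v) ≤ total
      · rw [if_pos hcond]
        have hstep : pfx + m * v + v = pfx + (m + 1) * v := by ring
        have hge : m + 1 ≤ subsetA_altWhile v total pfx c (m + 1) := altWhile_ge ..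
        rw [List.replicate_succ, List.cons_append, gtake,
          if_neg (by omega), hstep, ih (m + 1) (by omega)]
        rw [show (subsetA_altWhile v total pfx c (m+1) - m).toNat
              = (subsetA_altWhile v total pfx c (m+1) - (m+1)).toNat + 1 by omega]
        simp [List.replicate_succ]
      · rw [if_neg hcond]
        rw [List.replicate_succ, List.cons_append, gtake, if_pos (by omega)]
        simp [if_pos hm]

theorem groups_getD (arr : List Int) (v : Int) :
    (subsetA_altGroups arr).getD v 0 = (arr.count v : Int) := by
  rw [subsetA_altGroups, PySem.Dict.getD_foldl_insert_add_one]
  simp [PySem.Dict.getD_empty]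

-- B's block loop against the element greedy on the flattened blocks
theorem blocks_spec (arr : List Int) (total : Int) (vs : List Int) :
    ∀ (pfx : Int), vs.Pairwise (fun a b => b < a) →
    (subsetA_altBlocks (subsetA_altGroups arr) total vs pfx = none →
        gtake (blocksOf arr vs) total pfx = blocksOf arr vs) ∧
    (∀ t m, subsetA_altBlocks (subsetA_altGroups arr) total vs pfx = some (t, m) →
        gtake (blocksOf arr vs) total pfx =
          blocksOf arr (vs.takeWhile (fun v => decide (t < v))) ++ List.replicate m.toNat t ∧
        t ∈ vs ∧ 0 ≤ m ∧ m < (arr.count t : Int)) := by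
  induction vs with
  | nil =>
      intro pfx _
      constructor
      · intro _; rfl
      · intro t m h; simp [subsetA_altBlocks] at h
  | cons v vs ih =>
      intro pfx hsort
      rw [List.pairwise_cons] at hsort
      obtain ⟨hlt, hsort'⟩ := hsort
      have hc : (subsetA_altGroups arr).getD v 0 = (arr.count v : Int) := groups_getD arr v
      set c := (subsetA_altGroups arr).getD v 0 with hcdef
      set m0 := subsetA_altWhile v total pfx c 0 with hm0
      have hblocks : blocksOf arr (v :: vs) = List.replicate (arr.count v) v ++ blocksOf arr vs := by
        simp [blocksOf]
      have hg : gtake (blocksOf arr (v :: vs)) total pfx =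
          List.replicate m0.toNat v ++
            (if m0 < c then [] else gtake (blocksOf arr vs) total (pfx + c * v)) := by
        rw [hblocks]
        have := gtake_replicate v total pfx c (arr.count v) 0 (by omega) (blocksOf arr vs)
        simpa using this
      by_cases hbr : m0 < c
      · -- the block breaks here: some (v, m0)
        constructor
        · intro h
          rw [subsetA_altBlocks] at h
          simp only [← hcdef, ← hm0, if_pos hbr] at h
          exact absurd h (by simp)
        · intro t m h
          rw [subsetA_altBlocks] at h
          simp only [← hcdef, ← hm0, if_pos hbr, Option.some.injEq, Prod.mk.injEq] at h
          obtain ⟨ht, hm⟩ := h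
          subst ht; subst hm
          refine ⟨?_, List.mem_cons_self, altWhile_ge .., by omega⟩
          rw [hg, if_pos hbr]
          have hTW : (v :: vs).takeWhile (fun w => decide (v < w)) = [] := by
            simp
          rw [hTW]
          simp [blocksOf]
      · -- full block taken: m0 = c, recurse
        have hm0c : m0 = c := by
          have h1 := altWhile_le v total pfx c 0 (by omega)
          rw [← hm0] at h1
          omega
        have hrec : subsetA_altBlocks (subsetA_altGroups arr) total (v :: vs) pfx =
            subsetA_altBlocks (subsetA_altGroups arr) total vs (pfx + m0 * v) := by
          rw [subsetA_altBlocks]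
          simp only [← hcdef, ← hm0, if_neg hbr]
        have hgs : gtake (blocksOf arr (v :: vs)) total pfx =
            List.replicate (arr.count v) v ++ gtake (blocksOf arr vs) total (pfx + m0 * v) := by
          rw [hg, if_neg hbr, hm0c]
          rw [hc]
          simp
        obtain ⟨ihn, ihs⟩ := ih (pfx + m0 * v) hsort'
        constructor
        · intro h
          rw [hrec] at h
          rw [hgs, ihn h, hblocks]
        · intro t m h
          rw [hrec] at h
          obtain ⟨hgt, htm, hm1, hm2⟩ := ihs t m h
          have htv : t < v := hlt t htm
          refine ⟨?_, List.mem_cons_of_mem _ htm, hm1, hm2⟩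
          rw [hgs, hgt]
          rw [List.takeWhile_cons, if_pos (by simpa using htv)]
          simp [blocksOf]

-- A's filter loop copies the list when sub carries exactly the remaining multiplicities
theorem loop2_all (rest : List Int) : ∀ (sub out : List Int),
    (∀ v, sub.count v = rest.count v) →
    subsetA_loop2 rest sub out = out ++ rest := by
  induction rest with
  | nil => intro sub out _; simp [subsetA_loop2]
  | cons x rest ih =>
      intro sub out hinv
      have hx : sub.count x = (x :: rest).count x := hinv x
      have hmem : x ∈ sub := List.count_pos_iff.mp
        (by rw [hx, List.count_cons_self]; omega)
      rw [subsetA_loop2, if_pos hmem, PySem.List.remove?_eq_some_erase sub x hmem,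
        Option.getD_some, ih _ _ ?_]
      · simp
      · intro v
        by_cases hv : v = x
        · subst hv
          rw [List.count_erase_self, hx, List.count_cons_self]
          omega
        · rw [List.count_erase_of_ne hv, hinv v]
          simp [Ne.symm hv]

-- A's filter loop = B's threshold filter, under the count invariant
theorem loop2_eq_filter (t : Int) (rest : List Int) :
    ∀ (sub : List Int) (budget : Int) (out : List Int), 0 ≤ budget →
    (∀ v, (sub.count v : Int) =
      if t < v then (rest.count v : Int) else if v = t then budget else 0) →
    subsetA_loop2 rest sub out = subsetA_altFilter t rest budget out := by
  induction rest with
  | nil => intro sub budget out _ _; simp [subsetA_loop2, subsetA_altFilter]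
  | cons x rest ih =>
      intro sub budget out hb hinv
      have hx := hinv x
      have hcnt : ∀ v, v ≠ x → (x :: rest).count v = rest.count v := by
        intro v hv; simp [Ne.symm hv]
      rw [subsetA_loop2, subsetA_altFilter]
      by_cases hgt : t < x
      · rw [if_pos hgt, List.count_cons_self] at hx
        push_cast at hx
        have hmem : x ∈ sub := List.count_pos_iff.mp (by omega)
        rw [if_pos hmem, if_pos hgt, PySem.List.remove?_eq_some_erase sub x hmem,
          Option.getD_some]
        apply ih _ budget _ hb
        intro v
        by_cases hv : v = x
        · subst hv
          rw [List.count_erase_self, if_pos hgt]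
          omega
        · rw [List.count_erase_of_ne hv, hinv v, hcnt v hv]
      · rw [if_neg hgt] at hx
        rw [if_neg (by omega : ¬ x > t)]
        have hkeep : ∀ v, (sub.count v : Int) =
            if t < v then (rest.count v : Int) else if v = t then budget else 0 := by
          intro v
          rw [hinv v]
          by_cases hvt : t < v
          · rw [if_pos hvt, if_pos hvt, hcnt v (by omega)]
          · rw [if_neg hvt, if_neg hvt]
        by_cases hxt : x = t
        · rw [if_pos hxt] at hx
          by_cases hbpos : budget > 0
          · have hmem : x ∈ sub := List.count_pos_iff.mp (by omega)
            rw [if_pos hmem, if_pos ⟨hxt, hbpos⟩,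
              PySem.List.remove?_eq_some_erase sub x hmem, Option.getD_some]
            apply ih _ (budget - 1) _ (by omega)
            intro v
            by_cases hv : v = x
            · subst hv
              rw [List.count_erase_self, if_neg hgt, if_pos hxt]
              omega
            · rw [List.count_erase_of_ne hv, hkeep v]
              have hveq : ¬ v = t := by rw [← hxt]; exact hv
              by_cases hvt : t < v
              · rw [if_pos hvt, if_pos hvt]
              · rw [if_neg hvt, if_neg hvt, if_neg hveq, if_neg hveq]
          · have hnmem : x ∉ sub := fun hm => hbpos (by
              have := List.count_pos_iff.mpr hm; omega)
            rw [if_neg hnmem, if_neg (by tauto)]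
            exact ih _ budget _ hb hkeep
        · rw [if_neg hxt] at hx
          have hnmem : x ∉ sub := fun hm => by
            have := List.count_pos_iff.mpr hm; omega
          rw [if_neg hnmem, if_neg (by tauto)]
          exact ih _ budget _ hb hkeep

theorem count_blocksOf (arr : List Int) (vs : List Int) (hnd : vs.Nodup) (w : Int) :
    (blocksOf arr vs).count w = if w ∈ vs then arr.count w else 0 := by
  induction vs with
  | nil => simp [blocksOf]
  | cons v vs ih =>
      rw [List.nodup_cons] at hnd
      have : blocksOf arr (v :: vs) = List.replicate (arr.count v) v ++ blocksOf arr vs := by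
        simp [blocksOf]
      rw [this, List.count_append, List.count_replicate, ih hnd.2]
      by_cases hw : w = v
      · subst hw
        simp [hnd.1]
      · simp [hw, Ne.symm hw, List.mem_cons]

theorem pairwise_blocksOf (arr : List Int) (vs : List Int)
    (h : vs.Pairwise (fun a b => b < a)) :
    (blocksOf arr vs).Pairwise (fun a b => b ≤ a) := by
  induction vs with
  | nil => simp [blocksOf]
  | cons v vs ih =>
      rw [List.pairwise_cons] at h
      have hb : blocksOf arr (v :: vs) = List.replicate (arr.count v) v ++ blocksOf arr vs := by
        simp [blocksOf]
      rw [hb, List.pairwise_append]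
      refine ⟨List.pairwise_replicate.mpr (Or.inr le_rfl), ih h.2, ?_⟩
      intro a ha b hbm
      have ha' : a = v := List.eq_of_mem_replicate ha
      obtain ⟨u, hu, hb'⟩ := List.mem_flatMap.mp hbm
      have hb'' : b = u := List.eq_of_mem_replicate hb'
      subst ha'
      exact le_of_lt (hb'' ▸ h.1 u hu)

theorem takeWhile_eq_filter_desc (t : Int) (vs : List Int)
    (h : vs.Pairwise (fun a b => b < a)) :
    vs.takeWhile (fun w => decide (t < w)) = vs.filter (fun w => decide (t < w)) := by
  induction vs with
  | nil => rfl
  | cons v vs ih =>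
      rw [List.pairwise_cons] at h
      by_cases hv : t < v
      · rw [List.takeWhile_cons, List.filter_cons, if_pos (by simpa using hv)]
        simp only [decide_eq_true_eq] at *
        rw [if_pos hv, ih h.2]
      · rw [List.takeWhile_cons, List.filter_cons]
        rw [if_neg (by simpa using hv), if_neg (by simpa using hv)]
        have : vs.filter (fun w => decide (t < w)) = [] := by
          apply List.filter_eq_nil_iff.mpr
          intro u hu
          simp only [decide_eq_true_eq]
          have := h.1 u hu
          omega
        rw [this]

theorem keys_eq_ofList (arr : List Int) :
    (subsetA_altGroups arr).keys = PySem.Set.ofList arr := by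
  rw [show subsetA_altGroups arr = PySem.Dict.counter arr from
    PySem.Dict.foldl_insert_getD_add_one_eq_counter arr]
  exact PySem.Dict.keys_counter arr

theorem ks_nodup (arr : List Int) : (ksOf arr).Nodup :=
  (PySem.List.sorted_perm ..).nodup_iff.mpr
    (by rw [keys_eq_ofList]; exact PySem.Set.nodup_ofList arr)

theorem ks_mem (arr : List Int) (w : Int) : w ∈ ksOf arr ↔ w ∈ arr := by
  rw [ksOf, (PySem.List.sorted_perm ..).mem_iff, keys_eq_ofList, PySem.Set.mem_ofList]

theorem ks_desc (arr : List Int) : (ksOf arr).Pairwise (fun a b => b < a) := by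
  have h1 : (ksOf arr).Pairwise (fun a b => b ≤ a) := PySem.List.sorted_pairwise_rev ..
  exact (h1.and (ks_nodup arr)).imp (fun h => lt_of_le_of_ne h.1 (Ne.symm h.2))

-- the sorted element list IS the blocks of the sorted distinct values
theorem sorted_eq_blocks (arr : List Int) :
    PySem.List.sorted arr (fun x => x) true = blocksOf arr (ksOf arr) := by
  have hpermB : (blocksOf arr (ksOf arr)).Perm arr := by
    rw [List.perm_iff_count]
    intro w
    rw [count_blocksOf arr _ (ks_nodup arr) w]
    by_cases hw : w ∈ ksOf arr
    · rw [if_pos hw]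
    · rw [if_neg hw, Eq.comm, List.count_eq_zero]
      exact fun hc => hw ((ks_mem arr w).mpr hc)
  have hpermS : (PySem.List.sorted arr (fun x => x) true).Perm arr := PySem.List.sorted_perm ..
  refine (hpermS.trans hpermB.symm).eq_of_pairwise
    (fun a b _ _ h1 h2 => le_antisymm h2 h1) ?_ ?_
  · exact PySem.List.sorted_pairwise_rev ..
  · exact pairwise_blocksOf arr _ (ks_desc arr)

-- ===== VERDICT (by name: the statement is the Claim_ definition above) =====
theorem subsetA_spec : Claim_equal_subsetA := by
  intro arr _
  show subsetA arr = subsetA_alt arr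
  rw [subsetA]
  have htot : (PySem.List.sorted arr (fun x => x) true).sum = arr.sum :=
    (PySem.List.sorted_perm ..).sum_eq
  have h1 : subsetA_loop1 (PySem.List.sorted arr (fun x => x) true) [] =
      gtake (blocksOf arr (ksOf arr)) arr.sum 0 := by
    rw [loop1_eq_gtake _ [] arr.sum (by simp [htot]), sorted_eq_blocks]
    simp
  rw [h1]
  simp only [subsetA_alt, ← ksOf_def]
  rcases hB : subsetA_altBlocks (subsetA_altGroups arr) arr.sum (ksOf arr) 0 with _ | ⟨t, m⟩
  · -- no cut: every element is taken, the result is arr in original order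
    rw [(blocks_spec arr arr.sum (ksOf arr) 0 (ks_desc arr)).1 hB]
    rw [loop2_all arr _ [] ?_]
    · simp
    · intro v
      rw [count_blocksOf arr _ (ks_nodup arr) v]
      by_cases hv : v ∈ ksOf arr
      · rw [if_pos hv]
      · rw [if_neg hv, Eq.comm, List.count_eq_zero]
        exact fun hc => hv ((ks_mem arr v).mpr hc)
  · -- cut at value t with tie budget m
    obtain ⟨hgt, htm, hm0, hmlt⟩ := (blocks_spec arr arr.sum (ksOf arr) 0 (ks_desc arr)).2 t m hB
    rw [hgt]
    apply loop2_eq_filter t arr _ m [] hm0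
    intro v
    rw [List.count_append, List.count_replicate,
      takeWhile_eq_filter_desc t _ (ks_desc arr),
      count_blocksOf arr _ ((ks_nodup arr).filter _) v]
    simp only [beq_iff_eq]
    by_cases hvt : t < v
    · rw [if_pos hvt]
      rw [if_neg (by omega : ¬ t = v)]
      by_cases hv : v ∈ arr
      · rw [if_pos (by rw [List.mem_filter]; exact ⟨(ks_mem arr v).mpr hv, by simpa using hvt⟩)]
        push_cast
        omega
      · rw [if_neg (fun hmem => hv ((ks_mem arr v).mp (List.mem_filter.mp hmem).1)),
          Eq.comm]
        push_cast
        rw [List.count_eq_zero.mpr hv]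
        simp
    · rw [if_neg hvt]
      have hnf : v ∉ (ksOf arr).filter (fun w => decide (t < w)) := by
        intro hmem
        exact hvt (by simpa using (List.mem_filter.mp hmem).2)
      rw [if_neg hnf]
      by_cases hve : v = t
      · rw [if_pos hve.symm, if_pos hve]
        push_cast
        omega
      · rw [if_neg (fun h => hve h.symm), if_neg hve]
        simp
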